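-- pv_equiv track=rewrite | github.com/fernandocostabr420/pms | backend/app/api/public/middleware.py | sanitize_public_input
-- ===== SOURCE A (Python) =====
-- def sanitize_public_input(data: str) -> str:
--     """
--     Sanitiza inputs públicos para prevenir XSS e injeção.
--
--     Args:
--         data: String a ser sanitizada
--
--     Returns:
--         String sanitizada
--     """
--     if not data:
--         return data
--
--     # Remover caracteres perigosos
--     dangerous_chars = ['<', '>', '"', "'", '&', '\\']
--     sanitized = data
--
--     for char in dangerous_chars:
--         sanitized = sanitized.replace(char, '')
--
--     return sanitized.strip()
-- ===== SOURCE B (Python) =====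
-- def sanitize_public_input(data: str) -> str:
--     """Single-pass filter of dangerous characters, then strip."""
--     if not data:
--         return data
--     dangerous = {'<', '>', '"', "'", '&', '\\'}
--     return ''.join(c for c in data if c not in dangerous).strip()
-- ===== Notes on version B (the rewrite author's own statement) =====
-- stated objective: simpler
-- what changed: Replaces six sequential str.replace scans with a single pass that filters out characters belonging to a set of dangerous characters, then strips.
import Mathlib
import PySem

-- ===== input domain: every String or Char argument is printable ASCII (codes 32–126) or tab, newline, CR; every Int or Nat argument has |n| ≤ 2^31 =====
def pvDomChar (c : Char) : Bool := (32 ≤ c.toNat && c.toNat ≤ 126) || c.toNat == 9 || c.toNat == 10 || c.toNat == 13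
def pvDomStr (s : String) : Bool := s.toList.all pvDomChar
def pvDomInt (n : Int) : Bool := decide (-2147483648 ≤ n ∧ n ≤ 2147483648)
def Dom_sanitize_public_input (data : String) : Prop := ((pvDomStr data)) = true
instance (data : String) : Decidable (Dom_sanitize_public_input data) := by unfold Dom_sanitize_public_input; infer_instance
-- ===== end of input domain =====

-- ===== PORT A =====
-- B replaces A's six sequential replace passes with one filtering pass; same result incl. the falsy guard.
def sanitize_public_input (data : String) : String :=
  if data == "" then data
  else
    let dangerous_chars : List Char := ['<', '>', '"', '\'', '&', '\\']
    let sanitized := dangerous_chars.foldl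
      (fun s ch => PySem.Str.replace s (String.ofList [ch]) "") data
    PySem.Str.strip sanitized

-- ===== PORT B =====
def pvDangerous : List Char := ['<', '>', '"', '\'', '&', '\\']

def sanitize_public_input_alt (data : String) : String :=
  if data == "" then data
  else PySem.Str.strip (String.ofList (data.toList.filter (fun c => !pvDangerous.contains c)))

-- ===== PRECONDITION & SPEC =====
def Spec_sanitize_public_input (data : String) (out : String) : Prop := out = sanitize_public_input_alt data
instance (data : String) (out : String) : Decidable (Spec_sanitize_public_input data out) := by unfold Spec_sanitize_public_input; infer_instance

-- ===== CLAIM (what is proved, stated in full; the proofs are below) =====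
def Claim_equal_sanitize_public_input : Prop := ∀ (data : String), Dom_sanitize_public_input data → Spec_sanitize_public_input data (sanitize_public_input data)

-- ===== LEMMAS AND PROOFS =====
theorem pv_go_single (d : Char) :
    ∀ (fuel : Nat) (l acc : List Char), l.length ≤ fuel →
      PySem.Chars.replace.go [d] [] fuel l acc = acc.reverse ++ l.filter (fun c => c != d) := by
  intro fuel
  induction fuel with
  | zero =>
    intro l acc h
    have : l = [] := List.eq_nil_of_length_eq_zero (Nat.le_zero.mp h)
    subst this
    simp [PySem.Chars.replace.go]
  | succ n ih =>
    intro l acc h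
    cases l with
    | nil => simp [PySem.Chars.replace.go]
    | cons c t =>
      by_cases hc : c = d
      · subst hc
        have : [c].isPrefixOf (c :: t) = true := by simp [List.isPrefixOf]
        simp only [PySem.Chars.replace.go, this, if_true]
        rw [show List.drop [c].length (c :: t) = t from rfl,
            show ([] : List Char).reverse ++ acc = acc from rfl,
            ih t acc (by simpa using Nat.lt_succ_iff.mp (by simpa using h))]
        simp
      · have : [d].isPrefixOf (c :: t) = false := by
          simp [List.isPrefixOf]; exact fun hdc => (hc hdc.symm).elim
        simp only [PySem.Chars.replace.go, this, Bool.false_eq_true, if_false]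
        rw [ih t (c :: acc) (by simpa using Nat.lt_succ_iff.mp (by simpa using h))]
        simp [hc]

theorem pv_replace_single (d : Char) (s : List Char) :
    PySem.Chars.replace s [d] [] = s.filter (fun c => c != d) := by
  rw [PySem.Chars.replace]
  simp only [List.isEmpty_cons, Bool.false_eq_true, if_false]
  exact pv_go_single d s.length s [] (le_refl _)

-- ===== VERDICT (by name: the statement is the Claim_ definition above) =====
theorem sanitize_public_input_spec : Claim_equal_sanitize_public_input := by
  intro data _
  unfold Spec_sanitize_public_input sanitize_public_input sanitize_public_input_alt
  by_cases h : data == ""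
  · simp [h]
  · simp only [h, Bool.false_eq_true, if_false]
    refine congrArg PySem.Str.strip ?_
    have key : ∀ (ds : List Char) (s : String),
        (ds.foldl (fun t ch => PySem.Str.replace t (String.ofList [ch]) "") s).toList
          = s.toList.filter (fun c => !ds.contains c) := by
      intro ds
      induction ds with
      | nil => intro s; simp
      | cons d ds ih =>
        intro s
        simp only [List.foldl_cons]
        rw [ih]
        have : (PySem.Str.replace s (String.ofList [d]) "").toList
            = PySem.Chars.replace s.toList [d] [] := by
          simp [PySem.Str.toList_replace]
        rw [this, pv_replace_single, List.filter_filter]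
        congr 1
        funext c
        by_cases hcd : c = d <;> simp [hcd, Bool.and_comm]
    apply String.ext
    rw [key ['<', '>', '"', '\'', '&', '\\'] data]
    simp only [pvDangerous, String.toList_ofList]
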